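-- pv_equiv track=rewrite | github.com/louthrax/MSXJIO | MSXClient/beautifyZ80.py | spaces_to_tabs
-- ===== SOURCE A (Python) =====
-- def spaces_to_tabs(lines, tabsize=8):
--     result = []
--     for line in lines:
--         new_line = ''
--         col = 0
--         i = 0
--         while i < len(line):
--             char = line[i]
--             if char == ' ':
--                 # Compter le nombre d'espaces consécutifs
--                 start = i
--                 while i < len(line) and line[i] == ' ':
--                     i += 1
--                 space_count = i - start
--
--                 # Ajouter des tabs si possible, puis compléter par des espaces
--                 while space_count > 0:
--                     spaces_to_tab = tabsize - (col % tabsize)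
--                     if space_count >= spaces_to_tab:
--                         new_line += '\t'
--                         col += spaces_to_tab
--                         space_count -= spaces_to_tab
--                     else:
--                         new_line += ' ' * space_count
--                         col += space_count
--                         space_count = 0
--             else:
--                 new_line += char
--                 col += 1
--                 i += 1
--         result.append(new_line)
--     return result
-- ===== SOURCE B (Python) =====
-- def spaces_to_tabs(lines, tabsize=8):
--     # Single flat pass per line: keep a pending-space counter and the current
--     # column; emit a tab each time a space run crosses a tab stop, flush the
--     # leftover pending spaces at the next non-space or at end of line.
--     result = []
--     for line in lines:
--         new_line = ''
--         col = 0
--         pending = 0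
--         for char in line:
--             if char == ' ':
--                 pending += 1
--                 col += 1
--                 if col % tabsize == 0:
--                     new_line += '\t'
--                     pending = 0
--             else:
--                 if pending:
--                     new_line += ' ' * pending
--                     pending = 0
--                 new_line += char
--                 col += 1
--         if pending:
--             new_line += ' ' * pending
--         result.append(new_line)
--     return result
-- ===== Notes on version B (the rewrite author's own statement) =====
-- stated objective: simpler
-- what changed: replaces A's three nested while-loops (run counting plus a tab-emitting inner loop) with one flat per-character pass that keeps a pending-space counter and emits a tab exactly when the column crosses a tab stop
import Mathlib
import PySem

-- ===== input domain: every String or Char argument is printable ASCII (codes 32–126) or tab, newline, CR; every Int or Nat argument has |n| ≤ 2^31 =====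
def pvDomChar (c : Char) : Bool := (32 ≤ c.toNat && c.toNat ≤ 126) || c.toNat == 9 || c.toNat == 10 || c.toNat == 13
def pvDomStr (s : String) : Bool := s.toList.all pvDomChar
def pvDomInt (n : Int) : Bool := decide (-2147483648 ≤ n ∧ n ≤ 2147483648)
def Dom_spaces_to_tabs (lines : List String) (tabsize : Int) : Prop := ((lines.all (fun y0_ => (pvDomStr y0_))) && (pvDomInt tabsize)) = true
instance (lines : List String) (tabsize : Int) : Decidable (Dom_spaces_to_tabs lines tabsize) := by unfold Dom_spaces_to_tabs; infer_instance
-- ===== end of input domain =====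

-- B replaces A's three nested while-loops by one flat per-character pass with a
-- pending-space counter (objective: simpler); return values proved equal on Pre_.

-- ===== PORT A =====
-- inner `while i < len(line) and line[i] == ' '` counting loop
def countSpacesA : List Char → Nat
  | [] => 0
  | c :: r => if c = ' ' then countSpacesA r + 1 else 0

-- inner `while space_count > 0` loop; fuel = initial space_count, enough when tabsize ≥ 1
def emitTabsA (t : Int) : Nat → Int → Int → List Char → (List Char × Int)
  | 0, _, col, acc => (acc, col)
  | fuel + 1, sc, col, acc =>
    if 0 < sc then
      let g := t - PySem.Int.mod col t
      if g ≤ sc then emitTabsA t fuel (sc - g) (col + g) (acc ++ ['\t'])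
      else (acc ++ List.replicate sc.toNat ' ', col + sc)
    else (acc, col)

-- outer `while i < len(line)` loop
def lineA (t : Int) : List Char → Int → List Char → List Char
  | [], _, acc => acc
  | c :: rest, col, acc =>
    if h : c = ' ' then
      let k := countSpacesA (c :: rest)
      let r := emitTabsA t k (k : Int) col acc
      lineA t ((c :: rest).drop k) r.2 r.1
    else lineA t rest (col + 1) (acc ++ [c])
  termination_by cs => cs.length
  decreasing_by
  · have hk : 1 ≤ countSpacesA (c :: rest) := by simp [countSpacesA, h]
    simp only [List.length_drop, List.length_cons]
    omega
  · simp

def spaces_to_tabs (lines : List String) (tabsize : Int) : List String :=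
  lines.map (fun l => String.mk (lineA tabsize l.toList 0 []))

-- ===== PORT B =====
def lineB (t : Int) : List Char → Int → Int → List Char → List Char
  | [], _, pending, acc =>
    if pending ≠ 0 then acc ++ List.replicate pending.toNat ' ' else acc
  | c :: rest, col, pending, acc =>
    if c = ' ' then
      if PySem.Int.mod (col + 1) t = 0 then lineB t rest (col + 1) 0 (acc ++ ['\t'])
      else lineB t rest (col + 1) (pending + 1) acc
    else
      let acc1 := if pending ≠ 0 then acc ++ List.replicate pending.toNat ' ' else acc
      lineB t rest (col + 1) 0 (acc1 ++ [c])

def spaces_to_tabs_alt (lines : List String) (tabsize : Int) : List String :=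
  lines.map (fun l => String.mk (lineB tabsize l.toList 0 0 []))

-- ===== PRECONDITION & SPEC =====
-- Pre_ excludes only inputs on which A never returns: with a space present and
-- tabsize = 0 A raises ZeroDivisionError, with tabsize < 0 it loops forever;
-- every input A returns on (tabsize ≥ 1, or lines without spaces) is admitted.
def Pre_spaces_to_tabs (lines : List String) (tabsize : Int) : Prop :=
  1 ≤ tabsize ∨ ∀ l ∈ lines, ' ' ∉ l.toList
instance (lines : List String) (tabsize : Int) : Decidable (Pre_spaces_to_tabs lines tabsize) := by
  unfold Pre_spaces_to_tabs; infer_instance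

def pvWitness_spaces_to_tabs : List String × Int := (["ld   a, 5", "  ret"], 8)

def Spec_spaces_to_tabs (lines : List String) (tabsize : Int) (out : List String) : Prop := out = spaces_to_tabs_alt lines tabsize
instance (lines : List String) (tabsize : Int) (out : List String) : Decidable (Spec_spaces_to_tabs lines tabsize out) := by unfold Spec_spaces_to_tabs; infer_instance

-- ===== CLAIM (what is proved, stated in full; the proofs are below) =====
def Claim_equal_spaces_to_tabs : Prop := ∀ (lines : List String) (tabsize : Int), Dom_spaces_to_tabs lines tabsize → Pre_spaces_to_tabs lines tabsize → Spec_spaces_to_tabs lines tabsize (spaces_to_tabs lines tabsize)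

-- ===== LEMMAS AND PROOFS =====

theorem emod_sub_eq {col p t : Int} (ht : 1 ≤ t) (h0 : 0 ≤ p) (h1 : p ≤ col % t) :
    (col - p) % t = col % t - p := by
  have hlt : col % t < t := Int.emod_lt_of_pos _ (by omega)
  rw [Int.sub_emod, Int.emod_eq_of_lt h0 (by omega), Int.emod_eq_of_lt (by omega) (by omega)]

theorem emod_succ_eq (col t : Int) (ht : 1 ≤ t) :
    (col + 1) % t = if col % t = t - 1 then 0 else col % t + 1 := by
  have h0 : 0 ≤ col % t := Int.emod_nonneg _ (by omega)
  have h1 : col % t < t := Int.emod_lt_of_pos _ (by omega)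
  have key : (col + 1) % t = (col % t + 1) % t := by rw [Int.emod_add_emod]
  by_cases hr : col % t = t - 1
  · simp [hr, key]
  · rw [key, Int.emod_eq_of_lt (by omega) (by omega)]; simp [hr]

theorem emitTabsA_fuel (t : Int) (ht : 1 ≤ t) :
    ∀ (f1 f2 : Nat) (sc col : Int) (acc : List Char), 0 ≤ sc → sc.toNat ≤ f1 → sc.toNat ≤ f2 →
    emitTabsA t f1 sc col acc = emitTabsA t f2 sc col acc := by
  intro f1
  induction f1 with
  | zero =>
    intro f2 sc col acc h0 hf1 hf2
    have hsc : sc = 0 := by omega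
    subst hsc
    cases f2 <;> simp [emitTabsA]
  | succ f ih =>
    intro f2 sc col acc h0 hf1 hf2
    cases f2 with
    | zero =>
      have hsc : sc = 0 := by omega
      subst hsc
      simp [emitTabsA]
    | succ f2' =>
      by_cases hsc : 0 < sc
      · have hm : PySem.Int.mod col t < t := PySem.Int.mod_lt col (by omega)
        have hm0 : 0 ≤ PySem.Int.mod col t := PySem.Int.mod_nonneg col (by omega)
        simp only [emitTabsA, if_pos hsc]
        by_cases hg : t - PySem.Int.mod col t ≤ sc
        · simp only [if_pos hg]
          exact ih f2' _ _ _ (by omega) (by omega) (by omega)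
        · simp only [if_neg hg]
      · simp [emitTabsA, hsc]

theorem emitTabsA_small (t : Int) (ht : 1 ≤ t) (fuel : Nat) (sc col : Int) (acc : List Char)
    (h0 : 0 ≤ sc) (hf : sc.toNat ≤ fuel) (hlt : sc < t - col % t) :
    emitTabsA t fuel sc col acc = (acc ++ List.replicate sc.toNat ' ', col + sc) := by
  have hmod : PySem.Int.mod col t = col % t := PySem.Int.mod_eq_emod_of_pos (by omega)
  cases fuel with
  | zero =>
    have hsc : sc = 0 := by omega
    subst hsc
    simp [emitTabsA]
  | succ f =>
    by_cases hsc : 0 < sc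
    · simp only [emitTabsA, if_pos hsc, hmod, if_neg (by omega : ¬ t - col % t ≤ sc)]
    · have hsc0 : sc = 0 := by omega
      subst hsc0
      simp [emitTabsA]

theorem countSpacesA_append (k : Nat) (rest : List Char) :
    countSpacesA (List.replicate k ' ' ++ rest) = k + countSpacesA rest := by
  induction k with
  | zero => simp
  | succ j ih => simp [List.replicate_succ, countSpacesA, ih]; omega

theorem countSpacesA_decompose (cs : List Char) :
    cs = List.replicate (countSpacesA cs) ' ' ++ cs.drop (countSpacesA cs) ∧
    countSpacesA (cs.drop (countSpacesA cs)) = 0 := by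
  induction cs with
  | nil => simp [countSpacesA]
  | cons c rest ih =>
    by_cases h : c = ' '
    · subst h
      simp [countSpacesA, List.replicate_succ]
      exact ih
    · simp [countSpacesA, h]

theorem lineA_run (t : Int) (k : Nat) (rest : List Char) (col : Int) (acc : List Char)
    (hrest : countSpacesA rest = 0) :
    lineA t (List.replicate k ' ' ++ rest) col acc =
      lineA t rest (emitTabsA t k (k : Int) col acc).2 (emitTabsA t k (k : Int) col acc).1 := by
  cases k with
  | zero => simp [emitTabsA]
  | succ j =>
    rw [List.replicate_succ, List.cons_append, lineA]
    have hc : countSpacesA (' ' :: (List.replicate j ' ' ++ rest)) = j + 1 := by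
      simp [countSpacesA, countSpacesA_append, hrest]
    simp only [hc]
    have hdrop : (' ' :: (List.replicate j ' ' ++ rest)).drop (j + 1) = rest := by
      simp
    rw [hdrop]
    simp

theorem lineB_eq_lineA (t : Int) (ht : 1 ≤ t) :
    ∀ (cs : List Char) (col : Int) (p : Nat) (acc : List Char), (p : Int) ≤ PySem.Int.mod col t →
    lineB t cs col (p : Int) acc = lineA t (List.replicate p ' ' ++ cs) (col - p) acc := by
  have hmod : ∀ c : Int, PySem.Int.mod c t = c % t := fun c => PySem.Int.mod_eq_emod_of_pos (by omega)
  intro cs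
  induction cs with
  | nil =>
    intro col p acc hinv
    rw [hmod] at hinv
    have hr : 0 ≤ col % t ∧ col % t < t := ⟨Int.emod_nonneg _ (by omega), Int.emod_lt_of_pos _ (by omega)⟩
    have hsub : (col - p) % t = col % t - p := emod_sub_eq ht (by omega) hinv
    have hrun := lineA_run t p [] (col - p) acc rfl
    rw [List.append_nil] at hrun
    rw [List.append_nil, hrun, emitTabsA_small t ht p p (col - p) acc (by omega) (by simp) (by omega)]
    by_cases hp : p = 0
    · subst hp; simp [lineB, lineA]
    · simp [lineB, lineA, hp]
  | cons c rest ih =>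
    intro col p acc hinv
    rw [hmod] at hinv
    have hr : 0 ≤ col % t ∧ col % t < t := ⟨Int.emod_nonneg _ (by omega), Int.emod_lt_of_pos _ (by omega)⟩
    by_cases hc : c = ' '
    · subst hc
      rw [lineB, if_pos rfl, hmod]
      have hsucc := emod_succ_eq col t ht
      by_cases h0 : (col + 1) % t = 0
      · rw [if_pos h0]
        have hcol : col % t = t - 1 := by
          by_cases hx : col % t = t - 1
          · exact hx
          · rw [hsucc, if_neg hx] at h0; omega
        have lhs := ih (col + 1) 0 (acc ++ ['\t'])
          (by rw [hmod]; exact Int.emod_nonneg _ (by omega))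
        simp only [Nat.cast_zero, List.replicate_zero, List.nil_append, sub_zero] at lhs
        rw [lhs]
        -- now show lineA t rest (col+1) (acc++['\t']) = lineA t (replicate p ' ' ++ ' '::rest) (col-p) acc
        obtain ⟨hdec, hdec0⟩ := countSpacesA_decompose rest
        set m := countSpacesA rest with hm
        have hre : List.replicate p ' ' ++ ' ' :: rest = List.replicate (p + 1 + m) ' ' ++ rest.drop m := by
          conv_lhs => rw [hdec]
          rw [List.replicate_add, List.replicate_add]
          simp [List.replicate_succ]
        rw [hre, lineA_run t (p + 1 + m) _ _ _ hdec0]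
        conv_lhs => rw [hdec]
        rw [lineA_run t m _ _ _ hdec0]
        have hsub : (col - p) % t = col % t - p := emod_sub_eq ht (by omega) (by omega)
        have hstep : emitTabsA t (p + 1 + m) ((p + 1 + m : Nat) : Int) (col - p) acc
            = emitTabsA t (p + m) ((m : Nat) : Int) (col + 1) (acc ++ ['\t']) := by
          have hfe : p + 1 + m = (p + m) + 1 := by omega
          rw [hfe, emitTabsA]
          have hg : t - PySem.Int.mod (col - p) t = (p : Int) + 1 := by
            rw [hmod, hsub, hcol]; ring
          rw [if_pos (by push_cast; omega), hg]
          rw [if_pos (by push_cast; omega)]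
          have e1 : ((p + m + 1 : Nat) : Int) - ((p : Int) + 1) = (m : Int) := by push_cast; ring
          have e2 : col - (p : Int) + ((p : Int) + 1) = col + 1 := by ring
          rw [e1, e2]
        rw [hstep, emitTabsA_fuel t ht (p + m) m (m : Int) (col + 1) (acc ++ ['\t'])
          (by omega) (by simp) (by simp)]
      · rw [if_neg h0]
        have hcol : ¬ col % t = t - 1 := by
          intro hx; rw [hsucc, if_pos hx] at h0; exact h0 rfl
        have hs1 : (col + 1) % t = col % t + 1 := by rw [hsucc, if_neg hcol]
        have := ih (col + 1) (p + 1) acc (by rw [hmod]; push_cast; omega)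
        push_cast at this ⊢
        rw [this]
        have hre : List.replicate (p + 1) ' ' ++ rest = List.replicate p ' ' ++ ' ' :: rest := by
          simp [List.replicate_succ']
        rw [hre]
        congr 1
        ring
    · rw [lineB, if_neg hc]
      have hcs : countSpacesA (c :: rest) = 0 := by simp [countSpacesA, hc]
      rw [lineA_run t p (c :: rest) _ _ hcs]
      have hsub : (col - p) % t = col % t - p := emod_sub_eq ht (by omega) (by omega)
      rw [emitTabsA_small t ht p p (col - p) acc (by omega) (by simp) (by omega)]
      rw [lineA, dif_neg hc]
      have e2 : col - (p : Int) + (p : Int) = col := by ring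
      simp only [Int.toNat_natCast, e2]
      have lhs := ih (col + 1) 0
        ((if (p : Int) ≠ 0 then acc ++ List.replicate p ' ' else acc) ++ [c])
        (by rw [hmod]; exact Int.emod_nonneg _ (by omega))
      simp only [Nat.cast_zero, List.replicate_zero, List.nil_append, sub_zero] at lhs
      rw [lhs]
      by_cases hp : p = 0
      · subst hp; simp
      · simp [hp]

theorem lineA_eq_lineB_nospace (t : Int) :
    ∀ (cs : List Char) (col : Int) (acc : List Char), ' ' ∉ cs →
    lineB t cs col 0 acc = lineA t cs col acc := by
  intro cs
  induction cs with
  | nil => intro col acc _; simp [lineA, lineB]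
  | cons c rest ih =>
    intro col acc h
    have hc : ¬ c = ' ' := by simp at h; intro e; exact h.1 e.symm
    simp only [lineA, lineB, if_neg hc, dif_neg hc]
    exact ih _ _ (by simp at h ⊢; exact h.2)

-- ===== VERDICT (by name: the statement is the Claim_ definition above) =====
theorem spaces_to_tabs_spec : Claim_equal_spaces_to_tabs := by
  intro lines tabsize _ hpre
  unfold Spec_spaces_to_tabs spaces_to_tabs spaces_to_tabs_alt
  rcases hpre with ht | hns
  · refine List.map_congr_left ?_
    intro l _
    have := lineB_eq_lineA tabsize ht l.toList 0 0 []
      (by simpa using PySem.Int.mod_nonneg 0 (by omega : (0:Int) < tabsize))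
    simp only [Nat.cast_zero, List.replicate_zero, List.nil_append, sub_zero] at this
    rw [this]
  · refine List.map_congr_left ?_
    intro l hl
    rw [lineA_eq_lineB_nospace tabsize l.toList 0 [] (hns l hl)]
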